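-- pv_equiv track=rewrite | github.com/neerajsinghjr/dsa | neetcode/neetcode_all/01. array_and_hashing/e041_2264_largest_3_same_digit_number_in_string.py | _ansv2
-- ===== SOURCE A (Python) =====
-- def _ansv2(nums: str, n: int) -> str:
--     """
--     _run: rejected
--     _code: tc: o(n), sc: o(1), rt: nan, tcz: 76/141
--     _choke:
--     - misread the problem statment. problem was asking to return the max digit present
--     inside the given string.
--     _brief:
--     - from every while_loop index we predict next good integer by multipying 3 times
--     existing str if its match the real nums then its a good match;
--     - we handled the 3xZeroes separately. its there is zero's trio than we ignores it
--     and look for another one other than 3xZeroes.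
--     - This were we got choked by choke situation !!!
--     """
--     i = 0
--     avoid_3x0s = "000"
--     avoid_3x0s_flag = None
--     while i < n:
--         if i+2 < n:
--             exp_num = f"{nums[i]*3}"
--             if nums[i:i+3] == exp_num:
--                 avoid_3x0s_flag = avoid_3x0s == exp_num
--                 if not avoid_3x0s_flag:
--                     return exp_num
--                 i += 3
--             else:
--                 i += 1
--         else:
--             break
--     return avoid_3x0s if avoid_3x0s_flag else ""
-- ===== SOURCE B (Python) =====
-- def _ansv2(nums: str, n: int) -> str:
--     # single left-to-right run-length scan over the first n characters
--     s = nums[:max(n, 0)]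
--     prev = None
--     cnt = 0
--     found_zero = False
--     for ch in s:
--         cnt = cnt + 1 if ch == prev else 1
--         prev = ch
--         if cnt == 3:
--             if ch != '0':
--                 return ch * 3
--             found_zero = True
--     return "000" if found_zero else ""
-- ===== Notes on version B (the rewrite author's own statement) =====
-- stated objective: simpler
-- what changed: Replaces the window-comparison loop with index jumps (re-slicing nums[i:i+3] against nums[i]*3 and skipping 3 past zero triples) by a single run-length scan over nums[:n] that maintains the current character and a consecutive-equal count, returning on the first nonzero run of 3 and flagging zero runs.
-- outside the precondition, e.g. on _ansv2('111', 9): A returns '111', B returns '111'; on _ansv2('00', 10): A raises IndexError, B returns ''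
import Mathlib
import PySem

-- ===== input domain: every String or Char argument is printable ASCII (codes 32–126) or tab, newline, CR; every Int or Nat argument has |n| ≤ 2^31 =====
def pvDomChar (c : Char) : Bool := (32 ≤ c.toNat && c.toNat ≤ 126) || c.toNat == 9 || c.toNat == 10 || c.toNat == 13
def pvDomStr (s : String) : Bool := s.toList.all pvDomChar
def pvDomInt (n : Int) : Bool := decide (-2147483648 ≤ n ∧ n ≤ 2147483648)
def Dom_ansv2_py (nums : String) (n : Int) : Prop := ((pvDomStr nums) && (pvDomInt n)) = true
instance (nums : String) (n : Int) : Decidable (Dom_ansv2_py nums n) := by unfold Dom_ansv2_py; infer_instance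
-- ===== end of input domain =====

-- B replaces A's window-comparison loop (slice nums[i:i+3] vs nums[i]*3, jumping 3 past zero
-- triples) by a single run-length scan over nums[:n]; objective: simpler.


-- ===== PORT A =====
-- while-loop of A; state (i, flag); nums[i] via pyGet? (none = IndexError, unreachable inside Pre_)
-- final 'return avoid_3x0s if avoid_3x0s_flag else ""' (flag truthy iff some true)
def finret (flag : Option Bool) : String :=
  match flag with | some true => "000" | _ => ""

def aLoop (cs : List Char) (n : Int) (i : Int) (flag : Option Bool) : String :=
  if _h : i < n then
    if i + 2 < n then
      match PySem.List.pyGet? cs i with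
      | none => ""          -- IndexError in Python; excluded by Pre_
      | some c =>
        let exp : List Char := [c, c, c]                       -- exp_num = nums[i]*3
        if PySem.List.slice cs (some i) (some (i + 3)) = exp then
          let flagb : Bool := ['0', '0', '0'] == exp           -- avoid_3x0s == exp_num
          if !flagb then String.ofList exp
          else aLoop cs n (i + 3) (some flagb)
        else aLoop cs n (i + 1) flag
    else finret flag        -- break, then final return
  else finret flag
termination_by (n - i).toNat
decreasing_by all_goals omega

def ansv2_py (nums : String) (n : Int) : String := aLoop nums.toList n 0 none

-- ===== PORT B =====
-- run-length scan: prev char, consecutive count, zero-triple flag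
def bLoop (s : List Char) (prev : Option Char) (cnt : Int) (fz : Bool) : String :=
  match s with
  | [] => if fz then "000" else ""
  | c :: rest =>
    let cnt' : Int := if some c = prev then cnt + 1 else 1
    if cnt' = 3 then
      if c ≠ '0' then String.ofList [c, c, c]
      else bLoop rest (some c) cnt' true
    else bLoop rest (some c) cnt' fz

def ansv2_py_alt (nums : String) (n : Int) : String :=
  bLoop (PySem.Str.slice nums none (some (max n 0))).toList none 0 false

-- ===== PRECONDITION & SPEC =====
-- Pre_ excludes n > len(nums)+2: there A's nums[i] indexing can raise IndexError
-- (and where A happens to return early anyway, B returns the same value — see claim cites).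
def Pre_ansv2_py (nums : String) (n : Int) : Prop := n ≤ (nums.toList.length : Int) + 2
instance (nums : String) (n : Int) : Decidable (Pre_ansv2_py nums n) := by unfold Pre_ansv2_py; infer_instance
def pvWitness_ansv2_py : String × Int := ("2772", 4)

def Spec_ansv2_py (nums : String) (n : Int) (out : String) : Prop := out = ansv2_py_alt nums n
instance (nums : String) (n : Int) (out : String) : Decidable (Spec_ansv2_py nums n out) := by unfold Spec_ansv2_py; infer_instance

-- ===== CLAIM (what is proved, stated in full; the proofs are below) =====
def Claim_equal_ansv2_py : Prop := ∀ (nums : String) (n : Int), Dom_ansv2_py nums n → Pre_ansv2_py nums n → Spec_ansv2_py nums n (ansv2_py nums n)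

-- ===== LEMMAS AND PROOFS =====

-- common reference scan: all length-3 windows, advancing by 1
def W : List Char → Bool → String
  | a :: b :: c :: rest, fz =>
    if a = b ∧ b = c then
      if a ≠ '0' then String.ofList [a, a, a] else W (b :: c :: rest) true
    else W (b :: c :: rest) fz
  | _, fz => if fz then "000" else ""

lemma W_short (l : List Char) (fz : Bool) (h : l.length ≤ 2) :
    W l fz = if fz then "000" else "" := by
  match l with
  | [] => simp [W]
  | [a] => simp [W]
  | [a, b] => simp [W]
  | a :: b :: c :: r => simp at h

lemma W_zero_cons (r : List Char) : W ('0' :: r) true = W r true := by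
  match r with
  | [] => simp [W]
  | [b] => simp [W]
  | b :: c :: r' =>
    show W ('0' :: b :: c :: r') true = W (b :: c :: r') true
    by_cases h : '0' = b ∧ b = c <;> simp [W, h]

lemma W_step_ne (a b : Char) (r : List Char) (fz : Bool) (h : a ≠ b) :
    W (a :: b :: r) fz = W (b :: r) fz := by
  match r with
  | [] => simp [W]
  | c :: r' =>
    have : ¬ (a = b ∧ b = c) := by tauto
    simp [W, this]

lemma bLoop_eq_W :
    ∀ (rest : List Char) (c : Char) (cnt : Int) (fz : Bool),
      (cnt = 1 ∨ cnt = 2 ∨ (3 ≤ cnt ∧ c = '0' ∧ fz = true)) →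
      bLoop rest (some c) cnt fz =
        if cnt = 1 then W (c :: rest) fz
        else if cnt = 2 then W (c :: c :: rest) fz
        else W rest true := by
  intro rest
  induction rest with
  | nil =>
    intro c cnt fz h
    rcases h with h | h | ⟨h3, hc, hfz⟩
    · simp [h, bLoop, W]
    · simp [h, bLoop, W]
    · have h1 : cnt ≠ 1 := by omega
      have h2 : cnt ≠ 2 := by omega
      simp [h1, h2, hfz, bLoop, W]
  | cons d rest ih =>
    intro c cnt fz h
    rcases h with h | h | ⟨h3, hc, hfz⟩
    · -- cnt = 1
      subst h
      by_cases hdc : d = c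
      · subst hdc
        rw [show bLoop (d :: rest) (some d) 1 fz = bLoop rest (some d) 2 fz from by
          simp [bLoop]]
        rw [ih d 2 fz (Or.inr (Or.inl rfl))]
        simp
      · rw [show bLoop (d :: rest) (some c) 1 fz = bLoop rest (some d) 1 fz from by
          simp [bLoop, hdc]]
        rw [ih d 1 fz (Or.inl rfl)]
        simp
        exact (W_step_ne c d rest fz (fun he => hdc he.symm)).symm
    · -- cnt = 2
      subst h
      by_cases hdc : d = c
      · subst hdc
        by_cases hz : d = '0'
        · subst hz
          rw [show bLoop ('0' :: rest) (some '0') 2 fz = bLoop rest (some '0') 3 true from by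
            simp [bLoop]]
          rw [ih '0' 3 true (Or.inr (Or.inr ⟨by norm_num, rfl, rfl⟩))]
          simp
          rw [show W ('0' :: '0' :: '0' :: rest) fz = W ('0' :: '0' :: rest) true from by
            simp [W]]
          rw [W_zero_cons, W_zero_cons]
        · rw [show bLoop (d :: rest) (some d) 2 fz = String.ofList [d, d, d] from by
            simp [bLoop, hz]]
          simp [W, hz]
      · rw [show bLoop (d :: rest) (some c) 2 fz = bLoop rest (some d) 1 fz from by
          simp [bLoop, hdc]]
        rw [ih d 1 fz (Or.inl rfl)]
        simp
        rw [show W (c :: c :: d :: rest) fz = W (c :: d :: rest) fz from by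
          simp [W, show c ≠ d from fun he => hdc he.symm]]
        exact (W_step_ne c d rest fz (fun he => hdc he.symm)).symm
    · -- 3 ≤ cnt, c = '0', fz = true
      subst hc; subst hfz
      have h1 : cnt ≠ 1 := by omega
      have h2 : cnt ≠ 2 := by omega
      by_cases hdc : d = '0'
      · subst hdc
        rw [show bLoop ('0' :: rest) (some '0') cnt true = bLoop rest (some '0') (cnt + 1) true from by
          simp [bLoop, show cnt + 1 ≠ 3 from by omega]]
        rw [ih '0' (cnt + 1) true (Or.inr (Or.inr ⟨by omega, rfl, rfl⟩))]
        simp [show cnt + 1 ≠ 1 from by omega, show cnt + 1 ≠ 2 from by omega, h1, h2]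
        exact (W_zero_cons rest).symm
      · rw [show bLoop (d :: rest) (some '0') cnt true = bLoop rest (some d) 1 true from by
          simp [bLoop, hdc]]
        rw [ih d 1 true (Or.inl rfl)]
        simp [h1, h2]

lemma bLoop_top (t : List Char) : bLoop t none 0 false = W t false := by
  match t with
  | [] => simp [bLoop, W]
  | c :: rest =>
    rw [show bLoop (c :: rest) none 0 false = bLoop rest (some c) 1 false from by
      simp [bLoop]]
    rw [bLoop_eq_W rest c 1 false (Or.inl rfl)]
    simp

lemma aLoop_eq_W :
    ∀ (d : Nat) (cs : List Char) (n : Int) (j : Nat) (fz : Bool),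
      n ≤ (cs.length : Int) + 2 → (n - j).toNat ≤ d →
      aLoop cs n (j : Int) (if fz then some true else none) =
        W ((cs.take n.toNat).drop j) fz := by
  intro d
  induction d with
  | zero =>
    intro cs n j fz hn hd
    have hnj : ¬ ((j : Int) < n) := by omega
    rw [aLoop, dif_neg hnj]
    have hlen : ((cs.take n.toNat).drop j).length = 0 := by
      simp only [List.length_drop, List.length_take]; omega
    rw [List.length_eq_zero_iff.mp hlen]
    cases fz <;> simp [finret, W]
  | succ d ih =>
    intro cs n j fz hn hd
    by_cases hjn : (j : Int) < n
    · rw [aLoop, dif_pos hjn]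
      by_cases hj2 : (j : Int) + 2 < n
      · rw [if_pos hj2]
        have hjlen : j < cs.length := by omega
        have hget : PySem.List.pyGet? cs (j : Int) = some cs[j] := by
          rw [PySem.List.pyGet?_natCast]; simp [hjlen]
        rw [hget]
        have hslice : PySem.List.slice cs (some (j : Int)) (some ((j : Int) + 3))
            = (cs.drop j).take 3 := by
          rw [PySem.List.slice_toNat,
            show ((j : Int)).toNat = j from by omega,
            show ((j : Int) + 3).toNat = j + 3 from by omega,
            show j + 3 - j = 3 from by omega]
          all_goals omega
        set c := cs[j] with hc
        by_cases hmatch : (cs.drop j).take 3 = [c, c, c]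
        · simp only [hslice, if_pos hmatch]
          have hdropj : cs.drop j = c :: c :: c :: cs.drop (j + 3) := by
            have hlen3 : 3 ≤ (cs.drop j).length := by
              by_contra hcon
              have hlt : ((cs.drop j).take 3).length < 3 := by
                simp only [List.length_take]; omega
              rw [hmatch] at hlt; simp at hlt
            have htd := List.take_append_drop 3 (cs.drop j)
            rw [hmatch] at htd
            rw [← htd]
            simp [List.drop_drop]
          have hj2len : j + 2 < cs.length := by
            have hl := congrArg List.length hdropj
            simp at hl; omega
          have hLsplit : (cs.take n.toNat).drop j
              = c :: c :: c :: (cs.take n.toNat).drop (j + 3) := by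
            rw [List.drop_take, List.drop_take, hdropj]
            have he : n.toNat - j = (n.toNat - (j + 3)) + 3 := by omega
            rw [he]
            simp
          by_cases hz : c = '0'
          · rw [hz] at hdropj hLsplit hmatch ⊢
            have hflag : ((['0', '0', '0'] : List Char) == [('0' : Char), '0', '0']) = true := by decide
            simp only [hflag, Bool.not_true, if_neg (by simp : ¬ (false = true))]
            rw [show ((j : Int) + 3) = ((j + 3 : Nat) : Int) from by push_cast; ring]
            have hih := ih cs n (j + 3) true hn (by omega)
            rw [show (if true then some true else none) = some true from rfl] at hih
            rw [hih, hLsplit]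
            rw [show W ('0' :: '0' :: '0' :: (cs.take n.toNat).drop (j + 3)) fz
                = W ('0' :: '0' :: (cs.take n.toNat).drop (j + 3)) true from by simp [W]]
            rw [W_zero_cons, W_zero_cons]
          · have hflag : ((['0', '0', '0'] : List Char) == [c, c, c]) = false := by
              simp only [beq_eq_false_iff_ne, ne_eq, List.cons.injEq, and_true, not_and]
              intro h0; exact absurd h0.symm hz
            simp only [hflag, Bool.not_false]
            rw [hLsplit]
            simp [W, hz]
        · simp only [hslice, if_neg hmatch]
          rw [show ((j : Int) + 1) = ((j + 1 : Nat) : Int) from by push_cast; ring]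
          rw [ih cs n (j + 1) fz hn (by omega)]
          have hdd : (cs.take n.toNat).drop (j + 1) = ((cs.take n.toNat).drop j).drop 1 := by
            rw [List.drop_drop]
          rcases hL : (cs.take n.toNat).drop j with _ | ⟨a, _ | ⟨b, _ | ⟨e, r⟩⟩⟩
          · rw [hdd, hL]; simp
          · rw [hdd, hL]; simp [W]
          · rw [hdd, hL]; simp [W]
          · rw [hdd, hL]
            simp only [List.drop_succ_cons, List.drop_zero]
            have hL' : (cs.drop j).take (n.toNat - j) = a :: b :: e :: r := by
              rw [← List.drop_take]; exact hL
            have hlen3 : 3 ≤ n.toNat - j := by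
              have hl := congrArg List.length hL'
              simp only [List.length_take, List.length_drop, List.length_cons] at hl
              omega
            have hfirst : (cs.drop j).take 3 = [a, b, e] := by
              have h33 := congrArg (List.take 3) hL'
              rw [List.take_take] at h33
              simpa [show min 3 (n.toNat - j) = 3 from by omega] using h33
            have hdj : cs.drop j = a :: b :: e :: (cs.drop j).drop 3 := by
              conv_lhs => rw [← List.take_append_drop 3 (cs.drop j), hfirst]
              rfl
            have ha : a = c := by
              have hh := congrArg List.head? hdj
              rw [List.head?_drop, List.getElem?_eq_getElem hjlen] at hh
              exact (Option.some.inj hh).symm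
            have hnot : ¬ (a = b ∧ b = e) := by
              intro ⟨h1, h2⟩
              exact hmatch (by rw [hfirst, ← h2, ← h1, ha])
            exact (by simp [W, hnot] : W (a :: b :: e :: r) fz = W (b :: e :: r) fz).symm
      · rw [if_neg hj2]
        have hshort : ((cs.take n.toNat).drop j).length ≤ 2 := by
          simp only [List.length_drop, List.length_take]; omega
        rw [W_short _ _ hshort]
        cases fz <;> simp [finret]
    · rw [aLoop, dif_neg hjn]
      have hlen : ((cs.take n.toNat).drop j).length = 0 := by
        simp only [List.length_drop, List.length_take]; omega
      rw [List.length_eq_zero_iff.mp hlen]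
      cases fz <;> simp [finret, W]

lemma alt_eq_W (nums : String) (n : Int) :
    ansv2_py_alt nums n = W (nums.toList.take n.toNat) false := by
  unfold ansv2_py_alt
  rw [bLoop_top]
  congr 1
  have : (PySem.Str.slice nums none (some (max n 0))).toList
      = PySem.List.slice nums.toList none (some (max n 0)) := by
    simp [pysem]
  rw [this, PySem.List.slice_to]
  · congr 1
    omega
  · omega

-- ===== VERDICT (by name: the statement is the Claim_ definition above) =====
theorem ansv2_py_spec : Claim_equal_ansv2_py := by
  intro nums n _hdom hpre
  unfold Spec_ansv2_py
  unfold Pre_ansv2_py at hpre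
  rw [alt_eq_W]
  unfold ansv2_py
  have := aLoop_eq_W (n - 0).toNat nums.toList n 0 false hpre (by omega)
  simpa using this
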